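-- pv_equiv track=rewrite | github.com/s-emanuilov/world_mind | experiments/poc_4_rivers_extended/graph_rag/scripts/build_graph.py | clean_uri_part
-- ===== SOURCE A (Python) =====
-- def clean_uri_part(name: str) -> str:
--     """Clean a name to make it URI-safe."""
--     if not name:
--         return name
--
--     # Remove quotes, commas, arrows, parentheses and other problematic chars
--     cleaned = name.replace('"', '').replace(',', '').replace('->', '_').replace('(', '').replace(')', '').replace(':', '_').replace(';', '_')
--     # Replace spaces with underscores
--     cleaned = cleaned.replace(' ', '_')
--     # Remove multiple consecutive underscores
--     while '__' in cleaned: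
--         cleaned = cleaned.replace('__', '_')
--     # Remove leading/trailing underscores
--     cleaned = cleaned.strip('_')
--     return cleaned
-- ===== SOURCE B (Python) =====
-- def clean_uri_part(name: str) -> str:
--     """Clean a name to make it URI-safe (single-pass rewrite)."""
--     if not name:
--         return name
--     # Quotes and commas vanish first (as in the replace chain), which may
--     # expose new '->' arrows; then the only multi-char mapping is applied.
--     s = ''.join(c for c in name if c not in '",').replace('->', '_')
--     out = []
--     for c in s:
--         if c in '()':
--             continue
--         if c in ':; _':
--             if out and out[-1] == '_':
--                 continue
--             out.append('_')
--         else: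
--             out.append(c)
--     return ''.join(out).strip('_')
-- ===== Notes on version B (the rewrite author's own statement) =====
-- stated objective: alternative
-- what changed: Replaces A's eight sequential str.replace passes plus a fixpoint loop that repeatedly collapses doubled underscores with a single character-level pass that drops, maps and collapses underscores in one traversal (only the one multi-char arrow replacement is kept up front).
import Mathlib
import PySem

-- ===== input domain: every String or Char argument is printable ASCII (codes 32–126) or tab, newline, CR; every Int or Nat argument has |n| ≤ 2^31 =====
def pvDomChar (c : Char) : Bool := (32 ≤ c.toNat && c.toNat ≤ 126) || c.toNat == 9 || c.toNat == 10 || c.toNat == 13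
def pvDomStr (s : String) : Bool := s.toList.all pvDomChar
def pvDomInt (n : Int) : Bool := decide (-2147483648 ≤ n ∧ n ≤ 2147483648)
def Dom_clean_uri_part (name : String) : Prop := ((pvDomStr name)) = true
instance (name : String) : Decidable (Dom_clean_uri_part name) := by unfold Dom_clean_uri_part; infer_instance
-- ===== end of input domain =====

-- B folds the cleaning into a single character pass (drop / map-to-underscore /
-- collapse in one traversal) instead of A's chain of replace passes plus a
-- '__'-collapsing fixpoint loop; objective: alternative decomposition, same result.


-- ===== PORT A =====
-- while '__' in cleaned: cleaned = cleaned.replace('__', '_')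
-- (fuel only makes the same loop total: each replace strictly shortens the
--  string while '__' is present, so `cs.length` units of fuel always suffice)
def collapseLoop : Nat → List Char → List Char
  | 0, cs => cs
  | fuel+1, cs =>
      if PySem.Chars.isIn ['_', '_'] cs then
        collapseLoop fuel (PySem.Chars.replace cs ['_', '_'] ['_'])
      else cs

def clean_uri_part (name : String) : String :=
  if name = "" then name
  else
    let c1 := PySem.Chars.replace name.toList ['"'] []
    let c2 := PySem.Chars.replace c1 [','] []
    let c3 := PySem.Chars.replace c2 ['-', '>'] ['_']
    let c4 := PySem.Chars.replace c3 ['('] []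
    let c5 := PySem.Chars.replace c4 [')'] []
    let c6 := PySem.Chars.replace c5 [':'] ['_']
    let c7 := PySem.Chars.replace c6 [';'] ['_']
    let c8 := PySem.Chars.replace c7 [' '] ['_']
    let c9 := collapseLoop c8.length c8
    String.ofList (PySem.Chars.stripChars c9 ['_'])

-- ===== PORT B =====
def clean_uri_part_alt (name : String) : String :=
  if name = "" then name
  else
    let s := PySem.Chars.replace
      (name.toList.filter (fun c => !(c == '"' || c == ','))) ['-', '>'] ['_']
    let out := s.foldl
      (fun (out : List Char) c =>
        if c = '(' ∨ c = ')' then out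
        else if c = ':' ∨ c = ';' ∨ c = ' ' ∨ c = '_' then
          (if out ≠ [] ∧ out.getLast? = some '_' then out else out ++ ['_'])
        else out ++ [c]) []
    String.ofList (PySem.Chars.stripChars out ['_'])

-- ===== PRECONDITION & SPEC =====
def Spec_clean_uri_part (name : String) (out : String) : Prop := out = clean_uri_part_alt name
instance (name : String) (out : String) : Decidable (Spec_clean_uri_part name out) := by unfold Spec_clean_uri_part; infer_instance

-- ===== CLAIM (what is proved, stated in full; the proofs are below) =====
def Claim_equal_clean_uri_part : Prop := ∀ (name : String), Dom_clean_uri_part name → Spec_clean_uri_part name (clean_uri_part name)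

-- ===== LEMMAS AND PROOFS =====

-- one pass of cleaned.replace('__', '_')
def hDD : List Char → List Char
  | [] => []
  | [c] => [c]
  | c :: d :: t => if c = '_' ∧ d = '_' then '_' :: hDD t else c :: hDD (d :: t)

-- underscore-run collapser with a "previous emitted char was '_'" flag
def sqz : Bool → List Char → List Char
  | _, [] => []
  | prev, c :: v =>
      if c = '_' then (if prev then sqz true v else '_' :: sqz true v)
      else c :: sqz false v

-- does the list contain two adjacent underscores?
def hasDD : List Char → Bool
  | [] => false
  | [_] => false
  | c :: d :: t => (c == '_' && d == '_') || hasDD (d :: t)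

-- B's loop body as a recursion carrying the prev-flag
def gB : Bool → List Char → List Char
  | _, [] => []
  | prev, c :: t =>
      if c = '(' ∨ c = ')' then gB prev t
      else if c = ':' ∨ c = ';' ∨ c = ' ' ∨ c = '_' then
        (if prev then gB true t else '_' :: gB true t)
      else c :: gB false t

theorem go_nil (old new : List Char) (fuel : Nat) (acc : List Char) :
    PySem.Chars.replace.go old new fuel [] acc = acc.reverse := by
  cases fuel <;> simp [PySem.Chars.replace.go]

theorem go_succ (old new : List Char) (fuel : Nat) (c : Char) (t acc : List Char) :
    PySem.Chars.replace.go old new (fuel+1) (c::t) acc =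
      if old.isPrefixOf (c::t) then
        PySem.Chars.replace.go old new fuel (List.drop old.length (c::t)) (new.reverse ++ acc)
      else PySem.Chars.replace.go old new fuel t (c::acc) := by
  simp [PySem.Chars.replace.go]

theorem go_del (a : Char) (l : List Char) : ∀ (fuel : Nat) (acc : List Char),
    l.length ≤ fuel →
    PySem.Chars.replace.go [a] [] fuel l acc = acc.reverse ++ l.filter (fun c => !(c == a)) := by
  induction l with
  | nil => intro fuel acc _; simp [go_nil]
  | cons c t ih =>
    intro fuel acc hle
    cases fuel with
    | zero => simp at hle
    | succ f =>
      rw [go_succ]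
      by_cases hca : a = c
      · subst hca
        simp only [List.isPrefixOf, BEq.rfl, Bool.true_and, if_true,
          List.length_cons, List.length_nil, List.drop_succ_cons, List.drop_zero,
          List.reverse_nil, List.nil_append]
        rw [ih f acc (by simp at hle ⊢; omega)]
        simp
      · have hpre : (([a].isPrefixOf (c :: t))) = false := by
          simp [List.isPrefixOf]; exact fun h => hca h
        rw [hpre]
        simp only [Bool.false_eq_true, if_false]
        rw [ih f (c :: acc) (by simp at hle ⊢; omega)]
        simp [Ne.symm hca]

theorem replace_del (a : Char) (s : List Char) :
    PySem.Chars.replace s [a] [] = s.filter (fun c => !(c == a)) := by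
  rw [PySem.Chars.replace]
  simp only [List.isEmpty_cons, Bool.false_eq_true, if_false]
  simpa using go_del a s s.length [] le_rfl

theorem go_map1 (a b : Char) (l : List Char) : ∀ (fuel : Nat) (acc : List Char),
    l.length ≤ fuel →
    PySem.Chars.replace.go [a] [b] fuel l acc
      = acc.reverse ++ l.map (fun c => if c = a then b else c) := by
  induction l with
  | nil => intro fuel acc _; simp [go_nil]
  | cons c t ih =>
    intro fuel acc hle
    cases fuel with
    | zero => simp at hle
    | succ f =>
      rw [go_succ]
      by_cases hca : a = c
      · subst hca
        simp only [List.isPrefixOf, BEq.rfl, Bool.true_and, if_true,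
          List.length_cons, List.length_nil, List.drop_succ_cons, List.drop_zero,
          List.reverse_singleton, List.singleton_append]
        rw [ih f (b :: acc) (by simp at hle ⊢; omega)]
        simp
      · have hpre : (([a].isPrefixOf (c :: t))) = false := by
          simp [List.isPrefixOf]; exact fun h => hca h
        rw [hpre]
        simp only [Bool.false_eq_true, if_false]
        rw [ih f (c :: acc) (by simp at hle ⊢; omega)]
        simp [Ne.symm hca]

theorem replace_map1 (a b : Char) (s : List Char) :
    PySem.Chars.replace s [a] [b] = s.map (fun c => if c = a then b else c) := by
  rw [PySem.Chars.replace]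
  simp only [List.isEmpty_cons, Bool.false_eq_true, if_false]
  simpa using go_map1 a b s s.length [] le_rfl

theorem go_dd (l : List Char) : ∀ (fuel : Nat) (acc : List Char),
    l.length ≤ fuel →
    PySem.Chars.replace.go ['_', '_'] ['_'] fuel l acc = acc.reverse ++ hDD l := by
  induction l using hDD.induct with
  | case1 => intro fuel acc _; simp [go_nil, hDD]
  | case2 c =>
    intro fuel acc hle
    cases fuel with
    | zero => simp at hle
    | succ f =>
      rw [go_succ]
      have hpre : ((['_', '_'].isPrefixOf [c])) = false := by
        simp [List.isPrefixOf]
      rw [hpre]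
      simp only [Bool.false_eq_true, if_false]
      simp [go_nil, hDD]
  | case3 c d t h ih =>
    obtain ⟨rfl, rfl⟩ := h
    intro fuel acc hle
    cases fuel with
    | zero => simp at hle
    | succ f =>
      rw [go_succ]
      simp only [List.isPrefixOf, BEq.rfl, Bool.true_and, if_true,
        List.length_cons, List.length_nil, List.drop_succ_cons, List.drop_zero,
        List.reverse_singleton, List.singleton_append]
      rw [ih f ('_' :: acc) (by simp at hle ⊢; omega)]
      simp [hDD]
  | case4 c d t h ih =>
    intro fuel acc hle
    cases fuel with
    | zero => simp at hle
    | succ f =>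
      rw [go_succ]
      have hpre : ((['_', '_'].isPrefixOf (c :: d :: t))) = false := by
        simp [List.isPrefixOf]
        intro h1 h2
        exact h ⟨h1.symm, h2.symm⟩
      rw [hpre]
      simp only [Bool.false_eq_true, if_false]
      rw [ih f (c :: acc) (by simp at hle ⊢; omega)]
      simp [hDD, h]

theorem replace_dd (s : List Char) :
    PySem.Chars.replace s ['_', '_'] ['_'] = hDD s := by
  rw [PySem.Chars.replace]
  simp only [List.isEmpty_cons, Bool.false_eq_true, if_false]
  simpa using go_dd s s.length [] le_rfl

theorem hDD_len_le (l : List Char) : (hDD l).length ≤ l.length := by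
  induction l using hDD.induct with
  | case1 => simp [hDD]
  | case2 c => simp [hDD]
  | case3 c d t h ih => obtain ⟨rfl, rfl⟩ := h; simp [hDD] at ih ⊢; omega
  | case4 c d t h ih =>
    simp only [List.length_cons] at ih
    simp only [hDD, if_neg h, List.length_cons]
    omega

theorem hDD_len_lt (l : List Char) : hasDD l = true → (hDD l).length < l.length := by
  induction l using hDD.induct with
  | case1 => intro h; simp [hasDD] at h
  | case2 c => intro h; simp [hasDD] at h
  | case3 c d t h ih =>
    obtain ⟨rfl, rfl⟩ := h
    intro _
    have := hDD_len_le t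
    simp [hDD]
    omega
  | case4 c d t h ih =>
    intro hd
    have hdt : hasDD (d :: t) = true := by
      simp [hasDD] at hd
      rcases hd with ⟨h1, h2⟩ | h2
      · exact absurd ⟨h1, h2⟩ h
      · exact h2
    have := ih hdt
    simp only [hDD, if_neg h, List.length_cons] at this ⊢
    omega

theorem hasDD_cons (a : Char) (v : List Char) (h : hasDD v = true) : hasDD (a :: v) = true := by
  cases v with
  | nil => simp [hasDD] at h
  | cons d t => simp [hasDD, h]

theorem hasDD_of_infix (l : List Char) (h : ['_', '_'] <:+: l) : hasDD l = true := by
  obtain ⟨s, t', rfl⟩ := h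
  induction s with
  | nil => simp [hasDD]
  | cons a s ih => exact hasDD_cons _ _ ih

theorem infix_of_hasDD (l : List Char) : hasDD l = true → ['_', '_'] <:+: l := by
  induction l using hDD.induct with
  | case1 => intro h; simp [hasDD] at h
  | case2 c => intro h; simp [hasDD] at h
  | case3 c d t h ih =>
    obtain ⟨rfl, rfl⟩ := h
    intro _
    exact ⟨[], t, rfl⟩
  | case4 c d t h ih =>
    intro hd
    have hdt : hasDD (d :: t) = true := by
      simp [hasDD] at hd
      rcases hd with ⟨h1, h2⟩ | h2
      · exact absurd ⟨h1, h2⟩ h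
      · exact h2
    exact List.infix_cons (ih hdt)

theorem isIn_eq_hasDD (l : List Char) : PySem.Chars.isIn ['_', '_'] l = hasDD l := by
  by_cases h : hasDD l = true
  · rw [h]
    exact (PySem.Chars.isIn_iff_infix _ _).mpr (infix_of_hasDD l h)
  · have hb : hasDD l = false := by simpa using h
    rw [hb, PySem.Chars.isIn_eq_false_iff]
    intro hinf
    exact h (hasDD_of_infix l hinf)

theorem sqz_cons (prev : Bool) (c : Char) (v : List Char) :
    sqz prev (c :: v) = if c = '_' then (if prev then sqz true v else '_' :: sqz true v)
      else c :: sqz false v := rfl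

theorem sqz_hDD (l : List Char) : ∀ b, sqz b (hDD l) = sqz b l := by
  induction l using hDD.induct with
  | case1 => intro b; simp [hDD]
  | case2 c => intro b; simp [hDD]
  | case3 c d t h ih =>
    obtain ⟨rfl, rfl⟩ := h
    intro b
    have hd : hDD ('_' :: '_' :: t) = '_' :: hDD t := by simp [hDD]
    rw [hd]
    cases b <;> simp [sqz_cons, ih]
  | case4 c d t h ih =>
    intro b
    have hd : hDD (c :: d :: t) = c :: hDD (d :: t) := by simp [hDD, h]
    rw [hd, sqz_cons, sqz_cons]
    by_cases hc : c = '_' <;> cases b <;> simp [hc, ih]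

theorem sqz_fix (l : List Char) : hasDD l = false →
    sqz false l = l ∧ (l.head? ≠ some '_' → sqz true l = l) := by
  induction l using hasDD.induct with
  | case1 => intro _; simp [sqz]
  | case2 c =>
    intro _
    constructor
    · by_cases hc : c = '_' <;> simp [sqz, hc]
    · intro hh
      have hc : c ≠ '_' := by simpa using hh
      simp [sqz, hc]
  | case3 c d t ih =>
    intro h
    have hnd : ¬(c = '_' ∧ d = '_') := by
      intro ⟨h1, h2⟩; subst h1; subst h2; simp [hasDD] at h
    have hdt : hasDD (d :: t) = false := by
      simp [hasDD] at h; exact h.2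
    have ihd := ih hdt
    by_cases hc : c = '_'
    · subst hc
      have hd : d ≠ '_' := fun hd => hnd ⟨rfl, hd⟩
      have htr : sqz true (d :: t) = d :: t := ihd.2 (by simp [hd])
      constructor
      · rw [sqz_cons]; simp [htr]
      · intro hh; simp at hh
    · constructor
      · rw [sqz_cons]; simp [hc, ihd.1]
      · intro _; rw [sqz_cons]; simp [hc, ihd.1]

theorem collapseLoop_eq_sqz (fuel : Nat) : ∀ (l : List Char), l.length ≤ fuel →
    collapseLoop fuel l = sqz false l := by
  induction fuel with
  | zero =>
    intro l h
    have hl : l = [] := List.eq_nil_of_length_eq_zero (by omega)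
    subst hl
    simp [collapseLoop, sqz]
  | succ f ih =>
    intro l hle
    rw [collapseLoop, isIn_eq_hasDD]
    by_cases hdd : hasDD l = true
    · rw [hdd]
      simp only [if_true]
      rw [replace_dd, ih _ (by have := hDD_len_lt l hdd; omega)]
      exact sqz_hDD l false
    · have hb : hasDD l = false := by simpa using hdd
      rw [hb]
      simp only [Bool.false_eq_true, if_false]
      exact ((sqz_fix l hb).1).symm

theorem gB_eq_sqz (t : List Char) : ∀ prev,
    gB prev t = sqz prev ((t.filter (fun c => !(c == '(' || c == ')'))).map
      (fun c => if c = ':' ∨ c = ';' ∨ c = ' ' then '_' else c)) := by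
  induction t with
  | nil => intro prev; simp [gB, sqz]
  | cons c t ih =>
    intro prev
    by_cases h1 : c = '(' ∨ c = ')'
    · rcases h1 with rfl | rfl <;> simp [gB, ih]
    · have hnp := not_or.mp h1
      have hft : (c == '(' || c == ')') = false := by simp [hnp.1, hnp.2]
      by_cases h2 : c = ':' ∨ c = ';' ∨ c = ' ' ∨ c = '_'
      · have hσ : (if c = ':' ∨ c = ';' ∨ c = ' ' then '_' else c) = '_' := by
          rcases h2 with h | h | h | h <;> subst h <;> decide
        simp only [gB, if_neg h1, if_pos h2, List.filter_cons, hft, Bool.not_false, if_true,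
          List.map_cons, hσ, sqz]
        cases prev <;> simp [ih]
      · have hσ : (if c = ':' ∨ c = ';' ∨ c = ' ' then '_' else c) = c := by
          apply if_neg; intro hor; exact h2 (by tauto)
        have hne : c ≠ '_' := fun hc => h2 (Or.inr (Or.inr (Or.inr hc)))
        simp only [gB, if_neg h1, if_neg h2, List.filter_cons, hft, Bool.not_false, if_true,
          List.map_cons, hσ, sqz, if_neg hne]
        simp [ih]

theorem foldl_eq_gB (t : List Char) : ∀ (out : List Char),
    t.foldl (fun (out : List Char) c =>
        if c = '(' ∨ c = ')' then out
        else if c = ':' ∨ c = ';' ∨ c = ' ' ∨ c = '_' then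
          (if out ≠ [] ∧ out.getLast? = some '_' then out else out ++ ['_'])
        else out ++ [c]) out
      = out ++ gB (out.getLast? == some '_') t := by
  induction t with
  | nil => intro out; simp [gB]
  | cons c t ih =>
    intro out
    rw [List.foldl_cons]
    by_cases h1 : c = '(' ∨ c = ')'
    · rw [if_pos h1, ih]
      conv_rhs => rw [gB]
      rw [if_pos h1]
    · rw [if_neg h1]
      by_cases h2 : c = ':' ∨ c = ';' ∨ c = ' ' ∨ c = '_'
      · rw [if_pos h2]
        by_cases hlast : out.getLast? = some '_'
        · have hne : out ≠ [] := by intro h; subst h; simp at hlast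
          rw [if_pos ⟨hne, hlast⟩, ih]
          conv_rhs => rw [gB]
          rw [if_neg h1, if_pos h2]
          simp [hlast]
        · rw [if_neg (by intro h; exact hlast h.2), ih]
          conv_rhs => rw [gB]
          rw [if_neg h1, if_pos h2]
          have hb : (out.getLast? == some '_') = false := by
            simp [hlast]
          rw [hb]
          simp only [Bool.false_eq_true, if_false]
          simp
      · rw [if_neg h2, ih]
        conv_rhs => rw [gB]
        rw [if_neg h1, if_neg h2]
        have hne : c ≠ '_' := fun hc => h2 (Or.inr (Or.inr (Or.inr hc)))
        simp
        rw [show ((c == '_') = false) from by simpa using hne]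

-- ===== VERDICT (by name: the statement is the Claim_ definition above) =====
theorem clean_uri_part_spec : Claim_equal_clean_uri_part := by
  intro name _
  unfold Spec_clean_uri_part clean_uri_part clean_uri_part_alt
  by_cases h : name = ""
  · simp [h]
  · simp only [h, if_false]
    have hfilter : PySem.Chars.replace (PySem.Chars.replace name.toList ['"'] []) [','] []
        = name.toList.filter (fun c => !(c == '"' || c == ',')) := by
      rw [replace_del, replace_del, List.filter_filter]
      apply List.filter_congr
      intro c _
      simp [Bool.not_or, Bool.and_comm]
    rw [hfilter]
    rw [replace_del, replace_del, replace_map1, replace_map1, replace_map1]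
    have hf : ((PySem.Chars.replace (name.toList.filter fun c => !(c == '"' || c == ','))
            ['-', '>'] ['_']).filter (fun c => !(c == '('))).filter (fun c => !(c == ')'))
        = (PySem.Chars.replace (name.toList.filter fun c => !(c == '"' || c == ','))
            ['-', '>'] ['_']).filter (fun c => !(c == '(' || c == ')')) := by
      rw [List.filter_filter]
      apply List.filter_congr
      intro c _
      simp [Bool.not_or, Bool.and_comm]
    rw [hf, List.map_map, List.map_map]
    have hm : (((fun c => if c = ' ' then '_' else c) ∘ (fun c => if c = ';' then '_' else c))
          ∘ (fun c => if c = ':' then '_' else c))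
        = (fun c => if c = ':' ∨ c = ';' ∨ c = ' ' then '_' else c) := by
      funext c
      by_cases h1 : c = ':'
      · subst h1; decide
      · by_cases h2 : c = ';'
        · subst h2; decide
        · by_cases h3 : c = ' '
          · subst h3; decide
          · simp [Function.comp, h1, h2, h3]
    rw [hm, collapseLoop_eq_sqz _ _ le_rfl, foldl_eq_gB]
    simp only [List.getLast?_nil, List.nil_append]
    rw [gB_eq_sqz]
    rw [show ((none : Option Char) == some '_') = false from rfl]
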